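-- pv_equiv track=rewrite | github.com/stalliso/milcon_llm | parser.py | expand_multiline_cells
-- ===== SOURCE A (Python) =====
-- from typing import List, Dict, Any, Optional
--
-- def expand_multiline_cells(data_rows: List[List[str]]) -> List[List[str]]:
--     """Expand rows where cells contain newlines into one row per line (one facility per row)."""
--     out = []
--     for row in data_rows:
--         cell_lines = [c.splitlines() for c in row]
--         n_lines = max(len(cl) for cl in cell_lines) if cell_lines else 0
--         for k in range(n_lines):
--             out.append([
--                 (cell_lines[j][k] if k < len(cell_lines[j]) else "").strip()
--                 for j in range(len(row))
--             ])
--     return out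
-- ===== SOURCE B (Python) =====
-- def expand_multiline_cells(data_rows):
--     """Expand rows where cells contain newlines into one row per line (one facility per row)."""
--     out = []
--     for row in data_rows:
--         cols = [c.splitlines() for c in row]
--         while any(cols):
--             out.append([cl[0].strip() if cl else "" for cl in cols])
--             cols = [cl[1:] for cl in cols]
--     return out
-- ===== Notes on version B (the rewrite author's own statement) =====
-- stated objective: simpler
-- what changed: Replaces A's max()-of-lengths plus index loop with bounds guards by a head/tail transpose with fill: per row, repeatedly emit the stripped first lines and drop them until every column is exhausted.
import Mathlib
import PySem

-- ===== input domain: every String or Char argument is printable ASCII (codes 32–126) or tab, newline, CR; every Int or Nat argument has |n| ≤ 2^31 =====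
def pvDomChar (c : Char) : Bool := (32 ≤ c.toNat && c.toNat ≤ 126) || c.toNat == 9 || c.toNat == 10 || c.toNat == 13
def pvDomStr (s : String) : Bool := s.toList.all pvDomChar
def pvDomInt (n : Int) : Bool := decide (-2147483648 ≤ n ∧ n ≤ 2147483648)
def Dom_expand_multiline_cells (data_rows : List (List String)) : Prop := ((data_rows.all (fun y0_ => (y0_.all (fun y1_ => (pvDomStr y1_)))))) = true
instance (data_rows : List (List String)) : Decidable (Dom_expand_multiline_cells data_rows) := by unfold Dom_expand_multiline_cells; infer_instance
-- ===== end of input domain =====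

-- B (simpler): per row, transpose the ragged list of line-lists by repeatedly taking
-- stripped heads and tails until all columns are exhausted, instead of A's max()+index loop.

-- ===== PORT A =====
def expand_multiline_cells (data_rows : List (List String)) : List (List String) :=
  data_rows.foldl (fun out row =>
    let cell_lines := row.map PySem.Str.splitlines
    let n_lines := if cell_lines.isEmpty then 0 else ((cell_lines.map List.length).max?).getD 0
    (List.range n_lines).foldl (fun out k =>
      out ++ [(List.range row.length).map (fun j =>
        PySem.Str.strip ((cell_lines.getD j []).getD k ""))]) out) []

-- ===== PORT B =====
-- termination helper for the while loop of B (sum of remaining lines strictly decreases)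
theorem pvSumTailLe : ∀ (cols : List (List String)),
    ((cols.map (fun cl => cl.tail)).map List.length).sum ≤ (cols.map List.length).sum := by
  intro cols
  induction cols with
  | nil => simp
  | cons d u ihu =>
    simp only [List.map_cons, List.sum_cons]
    have : d.tail.length ≤ d.length := by cases d <;> simp
    omega

theorem pvSumTailLt (cols : List (List String))
    (h : cols.any (fun cl => !cl.isEmpty) = true) :
    ((cols.map (fun cl => cl.tail)).map List.length).sum < (cols.map List.length).sum := by
  induction cols with
  | nil => simp at h
  | cons c t ih =>
    simp only [List.any_cons, Bool.or_eq_true] at h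
    rcases h with h | h
    · cases c with
      | nil => simp at h
      | cons a cs =>
        have := pvSumTailLe t
        simp only [List.map_cons, List.sum_cons, List.tail_cons, List.length_cons]
        omega
    · have := ih h
      simp only [List.map_cons, List.sum_cons]
      have : c.tail.length ≤ c.length := by cases c <;> simp
      omega

def pvZipStrip (cols : List (List String)) : List (List String) :=
  if _h : cols.any (fun cl => !cl.isEmpty) = true then
    (cols.map (fun cl => match cl with
      | [] => ""
      | x :: _ => PySem.Str.strip x)) :: pvZipStrip (cols.map (fun cl => cl.tail))
  else []
termination_by (cols.map List.length).sum
decreasing_by simpa using pvSumTailLt cols _h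

def expand_multiline_cells_alt (data_rows : List (List String)) : List (List String) :=
  data_rows.foldl (fun out row => out ++ pvZipStrip (row.map PySem.Str.splitlines)) []

-- ===== PRECONDITION & SPEC =====
def Spec_expand_multiline_cells (data_rows : List (List String)) (out : List (List String)) : Prop := out = expand_multiline_cells_alt data_rows
instance (data_rows : List (List String)) (out : List (List String)) : Decidable (Spec_expand_multiline_cells data_rows out) := by unfold Spec_expand_multiline_cells; infer_instance

-- ===== CLAIM (what is proved, stated in full; the proofs are below) =====
def Claim_equal_expand_multiline_cells : Prop := ∀ (data_rows : List (List String)), Dom_expand_multiline_cells data_rows → Spec_expand_multiline_cells data_rows (expand_multiline_cells data_rows)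

-- ===== LEMMAS AND PROOFS =====

-- accumulator-append shape of A's inner loop
theorem pvFoldlAppendSingleton {α : Type} (g : Nat → α) :
    ∀ (l : List Nat) (out0 : List α),
      l.foldl (fun out k => out ++ [g k]) out0 = out0 ++ l.map g := by
  intro l
  induction l with
  | nil => simp
  | cons a t ih => intro out0; simp [List.foldl_cons, ih]

-- indexing over range of the length is just map
theorem pvRangeGetD {α β : Type} (h : α → β) (d : α) :
    ∀ (l : List α), (List.range l.length).map (fun j => h (l.getD j d)) = l.map h := by
  intro l
  induction l with
  | nil => simp
  | cons a t ih =>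
    simp only [List.length_cons, List.range_succ_eq_map, List.map_cons, List.map_map]
    refine congrArg₂ _ rfl ?_
    simpa using ih

-- Nat: monus 1 commutes with foldl max
theorem pvFoldlMaxSub : ∀ (l : List Nat) (a : Nat),
    (l.map (fun x => x - 1)).foldl max (a - 1) = l.foldl max a - 1 := by
  intro l
  induction l with
  | nil => intro a; simp
  | cons x t ih =>
    intro a
    simp only [List.map_cons, List.foldl_cons]
    rw [show max (a - 1) (x - 1) = max a x - 1 by omega]
    exact ih (max a x)

theorem pvSelfLeFoldlMax : ∀ (l : List Nat) (a : Nat), a ≤ l.foldl max a := by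
  intro l
  induction l with
  | nil => intro a; simp
  | cons y t ih =>
    intro a
    simp only [List.foldl_cons]
    exact le_trans (le_max_left _ _) (ih (max a y))

theorem pvLeFoldlMax : ∀ (l : List Nat) (a x : Nat), x ∈ l → x ≤ l.foldl max a := by
  intro l
  induction l with
  | nil => intro a x hx; simp at hx
  | cons y t ih =>
    intro a x hx
    rcases List.mem_cons.mp hx with rfl | hx
    · simp only [List.foldl_cons]
      exact le_trans (le_max_right a x) (pvSelfLeFoldlMax t (max a x))
    · exact ih _ _ hx

theorem pvFoldlMaxZero : ∀ (l : List Nat), (∀ x ∈ l, x = 0) → l.foldl max 0 = 0 := by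
  intro l
  induction l with
  | nil => simp
  | cons x t ih =>
    intro h
    have hx := h x (List.mem_cons_self ..)
    simp only [List.foldl_cons, hx, Nat.max_self]
    exact ih (fun y hy => h y (List.mem_cons_of_mem _ hy))

-- A's n_lines expression equals foldl max 0 of the lengths
theorem pvMaxEq (cols : List (List String)) :
    (if cols.isEmpty then 0 else ((cols.map List.length).max?).getD 0)
      = (cols.map List.length).foldl max 0 := by
  cases cols with
  | nil => simp
  | cons c t =>
    simp [List.max?, List.foldl_cons]

-- core: A's per-row block (in map-over-range form) equals B's head/tail transpose
theorem pvBlockEqAux : ∀ (n : Nat) (cols : List (List String)),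
    (cols.map List.length).sum ≤ n →
    (List.range ((cols.map List.length).foldl max 0)).map
      (fun k => cols.map (fun c => PySem.Str.strip (c.getD k ""))) = pvZipStrip cols := by
  intro n
  induction n with
  | zero =>
    intro cols hle
    rw [pvZipStrip]
    have h : cols.any (fun cl => !cl.isEmpty) = false := by
      rw [Bool.eq_false_iff]
      intro hany
      exact absurd (lt_of_lt_of_le (pvSumTailLt cols hany) hle) (by omega)
    simp only [h, Bool.false_eq_true, dite_false]
    have hz : (cols.map List.length).foldl max 0 = 0 := by
      apply pvFoldlMaxZero
      intro x hx
      rcases List.mem_map.mp hx with ⟨c, hc, rfl⟩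
      have := List.any_eq_false.mp h c hc
      cases c with
      | nil => simp
      | cons a t => simp at this
    rw [hz]
    simp
  | succ n ih =>
    intro cols hle
    rw [pvZipStrip]
    by_cases h : cols.any (fun cl => !cl.isEmpty) = true
    · simp only [h, dite_true]
      have hm : 1 ≤ (cols.map List.length).foldl max 0 := by
        rcases List.any_eq_true.mp h with ⟨c, hc, hne⟩
        have h1 : 1 ≤ c.length := by
          cases c with
          | nil => simp at hne
          | cons a t => simp
        exact le_trans h1 (pvLeFoldlMax _ 0 _ (List.mem_map_of_mem hc))
      have htails : (((cols.map (fun cl => cl.tail)).map List.length).foldl max 0)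
          = (cols.map List.length).foldl max 0 - 1 := by
        have heq : (cols.map (fun cl => cl.tail)).map List.length
            = (cols.map List.length).map (fun x => x - 1) := by
          simp [List.map_map]
        rw [heq, show (0 : Nat) = 0 - 1 by rfl, pvFoldlMaxSub]
      obtain ⟨m, hmeq⟩ : ∃ m, (cols.map List.length).foldl max 0 = m + 1 :=
        ⟨_, (Nat.succ_pred_eq_of_pos hm).symm⟩
      have hle' : ((cols.map (fun cl => cl.tail)).map List.length).sum ≤ n := by
        have := pvSumTailLt cols h
        omega
      rw [hmeq, List.range_succ_eq_map, List.map_cons]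
      refine congrArg₂ List.cons ?_ ?_
      · refine List.map_congr_left (fun c _ => ?_)
        cases c with
        | nil => rfl
        | cons a t => simp
      · rw [← ih _ hle', htails, hmeq]
        simp only [Nat.add_sub_cancel, List.map_map]
        refine List.map_congr_left (fun k _ => ?_)
        simp only [Function.comp_apply]
        refine List.map_congr_left (fun c _ => ?_)
        simp
    · simp only [h, Bool.false_eq_true, dite_false]
      have hz : (cols.map List.length).foldl max 0 = 0 := by
        apply pvFoldlMaxZero
        intro x hx
        rcases List.mem_map.mp hx with ⟨c, hc, rfl⟩
        have hne := List.any_eq_false.mp (Bool.eq_false_iff.mpr h) c hc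
        cases c with
        | nil => simp
        | cons a t => simp at hne
      rw [hz]
      simp

theorem pvBlockEq (cols : List (List String)) :
    (List.range ((cols.map List.length).foldl max 0)).map
      (fun k => cols.map (fun c => PySem.Str.strip (c.getD k ""))) = pvZipStrip cols :=
  pvBlockEqAux _ cols le_rfl

-- ===== VERDICT (by name: the statement is the Claim_ definition above) =====
theorem expand_multiline_cells_spec : Claim_equal_expand_multiline_cells := by
  intro data_rows _
  unfold Spec_expand_multiline_cells expand_multiline_cells expand_multiline_cells_alt
  have hstep : (fun (out : List (List String)) (row : List String) =>
      let cell_lines := row.map PySem.Str.splitlines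
      let n_lines := if cell_lines.isEmpty then 0 else ((cell_lines.map List.length).max?).getD 0
      (List.range n_lines).foldl (fun out k =>
        out ++ [(List.range row.length).map (fun j =>
          PySem.Str.strip ((cell_lines.getD j []).getD k ""))]) out)
      = (fun out row => out ++ pvZipStrip (row.map PySem.Str.splitlines)) := by
    funext out row
    simp only
    rw [pvFoldlAppendSingleton]
    refine congrArg _ ?_
    rw [pvMaxEq, ← pvBlockEq]
    refine List.map_congr_left (fun k _ => ?_)
    have h5 := pvRangeGetD (fun c => PySem.Str.strip (c.getD k "")) ([] : List String) (row.map PySem.Str.splitlines)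
    simpa [List.length_map] using h5
  rw [hstep]
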